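-- pv_equiv track=rewrite | github.com/RIshimoto/AtCoder_myPractice | ARC/ARC122/random_checker.py | solve_Jury
-- ===== SOURCE A (Python) =====
-- def solve_Jury(N, A):
--     MOD = 10**9+7
--     ans = 0
--     for i in range(1<<(N-1)):
--         ok = True
--         minus = False
--         sum = A[0]
--         for j in range(N-1):
--             if (i >> j) & 1 == 1:
--                 sum -= A[j+1]
--                 if minus == True:
--                     ok = False
--                 minus = True
--             else:
--                 sum += A[j+1]
--                 minus = False
--         if ok:
--             ans += sum
--     return ans % MOD
-- ===== SOURCE B (Python) =====
-- def solve_Jury(N, A):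
--     # Linear DP over positions, partitioning valid sign patterns by their
--     # last sign: (count, sum) for patterns ending in '+' and in '-'.
--     MOD = 10**9 + 7
--     cp, cm = 1, 0          # number of valid patterns ending in plus / minus
--     sp, sm = A[0], 0       # total of their sums
--     for k in range(1, N):
--         a = A[k]
--         cp, cm, sp, sm = cp + cm, cp, sp + sm + (cp + cm) * a, sp - cp * a
--     return (sp + sm) % MOD
-- ===== Notes on version B (the rewrite author's own statement) =====
-- stated objective: faster
-- what changed: B replaces A's enumeration of all 2^(N-1) sign patterns (each re-scanned in O(N)) by a single linear DP carrying (count, sum-total) of the valid patterns ending in plus and in minus; intended as faster (a timing run read B far faster at the largest size A still finished, but A times out beyond, so a timing run label stays unconfirmed).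
import Mathlib
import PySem

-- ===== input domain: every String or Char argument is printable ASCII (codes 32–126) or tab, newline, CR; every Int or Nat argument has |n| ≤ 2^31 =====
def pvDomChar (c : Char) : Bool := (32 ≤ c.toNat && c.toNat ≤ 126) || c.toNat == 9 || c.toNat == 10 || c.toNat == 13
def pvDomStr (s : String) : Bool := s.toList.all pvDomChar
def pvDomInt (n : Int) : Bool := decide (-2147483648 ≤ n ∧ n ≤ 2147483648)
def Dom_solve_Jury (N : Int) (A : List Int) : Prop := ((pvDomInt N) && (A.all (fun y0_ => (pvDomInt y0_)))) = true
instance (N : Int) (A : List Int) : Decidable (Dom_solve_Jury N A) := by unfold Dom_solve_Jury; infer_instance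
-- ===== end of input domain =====

-- B replaces A's enumeration of all 2^(N-1) sign patterns by a linear DP that
-- tracks (count, sum-total) of the valid patterns ending in '+' and in '-';
-- intended as faster; a timing run read B far faster at the largest size A
-- still finished, but A times out beyond, so a timing run label is unconfirmed.

-- ===== PORT A =====
-- one step of A's inner loop (body of 'for j in range(N-1)'); state = (ok, minus, sum).
-- Python's '(i >> j) & 1' is ported as 'PySem.Int.band (i >>> j.toNat) 1'; exact since every j
-- produced by range(N-1) is ≥ 0 and Lean's Int '>>>' is Python's arithmetic shift.
def pvAStep (A : List Int) (i : Int) (st : Bool × Bool × Int) (j : Int) : Bool × Bool × Int :=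
  if PySem.Int.band (i >>> j.toNat) 1 = 1 then
    (if st.2.1 then false else st.1, true, st.2.2 - PySem.List.pyGetD A (j + 1) 0)
  else
    (st.1, false, st.2.2 + PySem.List.pyGetD A (j + 1) 0)

-- A's inner loop: start from (True, False, A[0]) and process j = 0 .. m-1.
def pvAInner (A : List Int) (i : Int) (m : Int) : Bool × Bool × Int :=
  (PySem.List.pyRange 0 m 1).foldl (pvAStep A i) (true, false, PySem.List.pyGetD A 0 0)

-- Python's '1 << (N-1)' is ported as '1 <<< (N-1).toNat'; exact on Pre_ (N ≥ 1; Python raises for N ≤ 0).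
def solve_Jury (N : Int) (A : List Int) : Int :=
  PySem.Int.mod
    ((PySem.List.pyRange 0 ((1 : Int) <<< (N - 1).toNat) 1).foldl
      (fun ans i =>
        let st := pvAInner A i (N - 1)
        if st.1 then ans + st.2.2 else ans)
      0)
    (10 ^ 9 + 7)

-- ===== PORT B =====
-- one step of B's loop: state = (cp, cm, sp, sm).
def pvBStep (A : List Int) (st : Int × Int × Int × Int) (k : Int) : Int × Int × Int × Int :=
  let a := PySem.List.pyGetD A k 0
  (st.1 + st.2.1, st.1, st.2.2.1 + st.2.2.2 + (st.1 + st.2.1) * a, st.2.2.1 - st.1 * a)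

def solve_Jury_alt (N : Int) (A : List Int) : Int :=
  let st := (PySem.List.pyRange 1 N 1).foldl (pvBStep A) (1, 0, PySem.List.pyGetD A 0 0, 0)
  PySem.Int.mod (st.2.2.1 + st.2.2.2) (10 ^ 9 + 7)

-- ===== PRECONDITION & SPEC =====
-- Python A raises for N ≤ 0 (negative shift count) and for N > len(A) (IndexError, also N = 1 with A = []).
def Pre_solve_Jury (N : Int) (A : List Int) : Prop := 1 ≤ N ∧ N ≤ (A.length : Int)
instance (N : Int) (A : List Int) : Decidable (Pre_solve_Jury N A) := by unfold Pre_solve_Jury; infer_instance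

def pvWitness_solve_Jury : Int × List Int := (2, [3, 4])

def Spec_solve_Jury (N : Int) (A : List Int) (out : Int) : Prop := out = solve_Jury_alt N A
instance (N : Int) (A : List Int) (out : Int) : Decidable (Spec_solve_Jury N A out) := by unfold Spec_solve_Jury; infer_instance

-- ===== CLAIM (what is proved, stated in full; the proofs are below) =====
def Claim_equal_solve_Jury : Prop := ∀ (N : Int) (A : List Int), Dom_solve_Jury N A → Pre_solve_Jury N A → Spec_solve_Jury N A (solve_Jury N A)

-- ===== LEMMAS AND PROOFS =====

lemma pvAInner_succ (A : List Int) (i : Int) (n : Nat) :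
    pvAInner A i ((n : Int) + 1) = pvAStep A i (pvAInner A i (n : Int)) (n : Int) := by
  unfold pvAInner
  rw [PySem.List.pyRange_one_succ_right (by omega), List.foldl_append]
  rfl

lemma pvAInner_congr (A : List Int) (i i' : Int) (n : Nat)
    (h : ∀ j : Nat, j < n → PySem.Int.band (i >>> j) 1 = PySem.Int.band (i' >>> j) 1) :
    pvAInner A i (n : Int) = pvAInner A i' (n : Int) := by
  induction n with
  | zero => rfl
  | succ m ih =>
      have hm : ((m : Int) + 1) = ((m + 1 : Nat) : Int) := by push_cast; ring
      rw [← hm, pvAInner_succ, pvAInner_succ, ih (fun j hj => h j (by omega))]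
      unfold pvAStep
      rw [show ((m : Int)).toNat = m from Int.toNat_natCast m, h m (by omega)]

lemma pvBit_low (n j i : Nat) (hj : j < n) :
    PySem.Int.band (((2 ^ n + i : Nat) : Int) >>> j) 1 = PySem.Int.band ((i : Nat) >>> j) 1 := by
  have h1 : ((2 ^ n + i : Nat) : Int) >>> j = (((2 ^ n + i) >>> j : Nat) : Int) := by exact_mod_cast rfl
  rw [h1, show ((1 : Int)) = ((1 : Nat) : Int) from rfl, PySem.Int.band_natCast, PySem.Int.band_natCast]
  norm_cast
  rw [Nat.shiftRight_eq_div_pow, Nat.shiftRight_eq_div_pow, Nat.and_one_is_mod, Nat.and_one_is_mod]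
  have hsplit : 2 ^ n + i = i + 2 ^ (n - j - 1) * 2 * 2 ^ j := by
    have h : 2 ^ (n - j - 1) * 2 * 2 ^ j = 2 ^ n := by
      calc 2 ^ (n - j - 1) * 2 * 2 ^ j = 2 ^ ((n - j - 1) + 1 + j) := by
              rw [pow_add, pow_add, pow_one]
        _ = 2 ^ n := by congr 1; omega
    omega
  rw [hsplit, Nat.add_mul_div_right _ _ (Nat.two_pow_pos j),
      mul_comm (2 ^ (n - j - 1)) 2, mul_comm 2 (2 ^ (n - j - 1)), Nat.add_mul_mod_self_right]

lemma pvBit_high_zero (n i : Nat) (hi : i < 2 ^ n) :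
    PySem.Int.band (((i : Nat) : Int) >>> n) 1 = 0 := by
  have h2 : ((i : Nat) : Int) >>> n = ((i >>> n : Nat) : Int) := by exact_mod_cast rfl
  rw [h2, show ((1 : Int)) = ((1 : Nat) : Int) from rfl, PySem.Int.band_natCast]
  norm_cast
  rw [Nat.shiftRight_eq_div_pow, Nat.div_eq_of_lt hi]
  rfl

lemma pvBit_high_one (n i : Nat) (hi : i < 2 ^ n) :
    PySem.Int.band (((2 ^ n + i : Nat) : Int) >>> n) 1 = 1 := by
  have h1 : ((2 ^ n + i : Nat) : Int) >>> n = (((2 ^ n + i) >>> n : Nat) : Int) := by exact_mod_cast rfl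
  rw [h1, show ((1 : Int)) = ((1 : Nat) : Int) from rfl, PySem.Int.band_natCast]
  norm_cast
  rw [Nat.shiftRight_eq_div_pow, Nat.add_comm, Nat.add_div_right _ (Nat.two_pow_pos n),
      Nat.div_eq_of_lt hi]
  simp

def pvFCP (st : Bool × Bool × Int) : Int := if st.1 ∧ ¬ st.2.1 then 1 else 0

def pvFCM (st : Bool × Bool × Int) : Int := if st.1 ∧ st.2.1 then 1 else 0

def pvFSP (st : Bool × Bool × Int) : Int := if st.1 ∧ ¬ st.2.1 then st.2.2 else 0

def pvFSM (st : Bool × Bool × Int) : Int := if st.1 ∧ st.2.1 then st.2.2 else 0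

def pvFAns (st : Bool × Bool × Int) : Int := if st.1 then st.2.2 else 0

def pvJsum (A : List Int) (n : Nat) (f : Bool × Bool × Int → Int) : Int :=
  ((List.range (2 ^ n)).map (fun (i : Nat) => f (pvAInner A (i : Int) (n : Int)))).sum

lemma pvJsum_succ (A : List Int) (n : Nat) (f : Bool × Bool × Int → Int) :
    pvJsum A (n + 1) f =
      ((List.range (2 ^ n)).map (fun (i : Nat) =>
        f ((pvAInner A (i : Int) (n : Int)).1, false,
           (pvAInner A (i : Int) (n : Int)).2.2 + PySem.List.pyGetD A ((n : Int) + 1) 0))).sum +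
      ((List.range (2 ^ n)).map (fun (i : Nat) =>
        f ((if (pvAInner A (i : Int) (n : Int)).2.1 then false else (pvAInner A (i : Int) (n : Int)).1), true,
           (pvAInner A (i : Int) (n : Int)).2.2 - PySem.List.pyGetD A ((n : Int) + 1) 0))).sum := by
  unfold pvJsum
  rw [pow_succ, mul_two, List.range_add, List.map_append, List.sum_append, List.map_map]
  have hcast : ((n + 1 : Nat) : Int) = (n : Int) + 1 := by push_cast; ring
  congr 1
  · apply congrArg
    apply List.map_congr_left
    intro i hi
    have hi' : i < 2 ^ n := List.mem_range.mp hi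
    rw [hcast, pvAInner_succ]
    unfold pvAStep
    rw [Int.toNat_natCast, pvBit_high_zero n i hi', if_neg (by decide)]
  · apply congrArg
    apply List.map_congr_left
    intro i hi
    have hi' : i < 2 ^ n := List.mem_range.mp hi
    simp only [Function.comp]
    have h2 : ((2 ^ n + i : Nat) : Int) = ((2 ^ n + i : Nat) : Int) := rfl
    rw [show (2 ^ n + i : Nat) = ((2 ^ n + i : Nat)) from rfl]
    rw [hcast, pvAInner_succ]
    unfold pvAStep
    rw [Int.toNat_natCast, pvBit_high_one n i hi', if_pos rfl]
    rw [pvAInner_congr A ((2 ^ n + i : Nat) : Int) ((i : Nat) : Int) n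
      (fun j hj => pvBit_low n j i hj)]

def pvBDP (A : List Int) : Nat → Int × Int × Int × Int
  | 0 => (1, 0, PySem.List.pyGetD A 0 0, 0)
  | n + 1 => pvBStep A (pvBDP A n) ((n : Int) + 1)

lemma pvP1 (st : Bool × Bool × Int) (x : Int) : pvFCP (st.1, false, x) = pvFCP st + pvFCM st := by
  rcases st with ⟨ok, m, s⟩; cases ok <;> cases m <;> simp [pvFCP, pvFCM]

lemma pvP2 (st : Bool × Bool × Int) (x : Int) : pvFCM (st.1, false, x) = 0 := by
  simp [pvFCM]

lemma pvP3 (st : Bool × Bool × Int) (a : Int) :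
    pvFSP (st.1, false, st.2.2 + a) = pvFSP st + pvFSM st + a * (pvFCP st + pvFCM st) := by
  rcases st with ⟨ok, m, s⟩; cases ok <;> cases m <;> simp [pvFCP, pvFCM, pvFSP, pvFSM] <;> ring

lemma pvP4 (st : Bool × Bool × Int) (x : Int) : pvFSM (st.1, false, x) = 0 := by
  simp [pvFSM]

lemma pvM1 (c : Bool) (x : Int) : pvFCP (c, true, x) = 0 := by simp [pvFCP]

lemma pvM2 (st : Bool × Bool × Int) (x : Int) :
    pvFCM ((if st.2.1 then false else st.1), true, x) = pvFCP st := by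
  rcases st with ⟨ok, m, s⟩; cases ok <;> cases m <;> simp [pvFCP, pvFCM]

lemma pvM3 (c : Bool) (x : Int) : pvFSP (c, true, x) = 0 := by simp [pvFSP]

lemma pvM4 (st : Bool × Bool × Int) (a : Int) :
    pvFSM ((if st.2.1 then false else st.1), true, st.2.2 - a) = pvFSP st + (-a) * pvFCP st := by
  rcases st with ⟨ok, m, s⟩; cases ok <;> cases m <;> simp [pvFCP, pvFSP, pvFSM] <;> ring

lemma pvInv (A : List Int) (n : Nat) :
    pvJsum A n pvFCP = (pvBDP A n).1 ∧ pvJsum A n pvFCM = (pvBDP A n).2.1 ∧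
    pvJsum A n pvFSP = (pvBDP A n).2.2.1 ∧ pvJsum A n pvFSM = (pvBDP A n).2.2.2 := by
  induction n with
  | zero =>
      norm_num [pvJsum, pvBDP, pvAInner, pvFCP, pvFCM, pvFSP, pvFSM,
        PySem.List.pyRange_one_eq_nil]
  | succ m ih =>
      obtain ⟨h1, h2, h3, h4⟩ := ih
      unfold pvJsum at h1 h2 h3 h4
      refine ⟨?_, ?_, ?_, ?_⟩ <;>
      · simp only [pvJsum_succ, pvP1, pvP2, pvP3, pvP4, pvM1, pvM2, pvM3, pvM4,
          PySem.List.sum_map_add_int, PySem.List.sum_map_const_mul_int]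
        simp only [List.map_const', List.sum_replicate, smul_zero, add_zero, zero_add]
        rw [show pvBDP A (m + 1) = pvBStep A (pvBDP A m) ((m : Int) + 1) from rfl]
        dsimp only [pvBStep]
        simp only [h1, h2, h3, h4]
        try push_cast
        try ring

lemma pvBFold (A : List Int) (n : Nat) :
    (PySem.List.pyRange 1 ((n : Int) + 1) 1).foldl (pvBStep A) (1, 0, PySem.List.pyGetD A 0 0, 0)
      = pvBDP A n := by
  induction n with
  | zero => rw [PySem.List.pyRange_one_eq_nil (by norm_num)]; rfl
  | succ m ih =>
      have hc : ((m + 1 : Nat) : Int) + 1 = ((m : Int) + 1) + 1 := by push_cast; ring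
      rw [hc, PySem.List.pyRange_one_succ_right (by omega), List.foldl_append, ih]
      rfl

lemma pvAnsSplit (st : Bool × Bool × Int) : pvFAns st = pvFSP st + pvFSM st := by
  rcases st with ⟨ok, m, s⟩; cases ok <;> cases m <;> simp [pvFAns, pvFSP, pvFSM]

lemma pvAFold (A : List Int) (n : Nat) :
    (PySem.List.pyRange 0 ((2 ^ n : Nat) : Int) 1).foldl
      (fun ans i =>
        let st := pvAInner A i (n : Int)
        if st.1 then ans + st.2.2 else ans) 0
    = pvJsum A n pvFAns := by
  have hbody : (fun (ans : Int) (i : Int) =>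
      let st := pvAInner A i (n : Int)
      if st.1 then ans + st.2.2 else ans)
      = fun ans i => ans + pvFAns (pvAInner A i (n : Int)) := by
    funext ans i
    by_cases h : (pvAInner A i (n : Int)).1 <;> simp [pvFAns, h]
  rw [hbody, PySem.List.foldl_add, PySem.List.pyRange_zero_nat, List.map_map]
  simp [pvJsum, Function.comp_def]

-- ===== VERDICT (by name: the statement is the Claim_ definition above) =====
set_option maxRecDepth 4096 in
theorem solve_Jury_spec : Claim_equal_solve_Jury := by
  intro N A _ hPre
  obtain ⟨n, hn⟩ : ∃ n : Nat, N = (n : Int) + 1 := ⟨(N - 1).toNat, by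
    have := hPre.1; omega⟩
  subst hn
  unfold Spec_solve_Jury solve_Jury solve_Jury_alt
  simp only [add_sub_cancel_right, Int.toNat_natCast]
  refine congrArg (fun x => PySem.Int.mod x (10 ^ 9 + 7)) ?_
  rw [show ((1 : Int) <<< n) = ((2 ^ n : Nat) : Int) from by
      rw [Int.shiftLeft_eq]; push_cast; ring]
  rw [pvAFold, pvBFold]
  have hsplit : pvJsum A n pvFAns = pvJsum A n pvFSP + pvJsum A n pvFSM := by
    simp only [pvJsum, pvAnsSplit, PySem.List.sum_map_add_int]
  obtain ⟨-, -, h3, h4⟩ := pvInv A n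
  rw [hsplit, h3, h4]
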